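-- pv_equiv track=rewrite | github.com/TessFerrandez/algorithms | hash-table/lc-1679-max-number-of-k-sum-pairs.py | maxOperations1
-- ===== SOURCE A (Python) =====
-- from typing import Counter, List
--
-- def maxOperations1(nums: List[int], k: int) -> int:
--     freq = dict(Counter(nums))
--
--     pairs = 0
--     for num in freq:
--         target = k - num
--         if target == num:
--             ops = freq[num] // 2
--             pairs += ops
--             freq[num] -= ops * 2
--         elif target > num and target in freq:
--             ops = min(freq[num], freq[target])
--             pairs += ops
--             freq[num] -= ops
--             freq[target] -= ops
--     return pairs
-- ===== SOURCE B (Python) =====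
-- def maxOperations1(nums, k):
--     pairs = 0
--     waiting = {}
--     for num in nums:
--         need = k - num
--         if waiting.get(need, 0) > 0:
--             waiting[need] -= 1
--             pairs += 1
--         else:
--             waiting[num] = waiting.get(num, 0) + 1
--     return pairs
-- ===== Notes on version B (the rewrite author's own statement) =====
-- stated objective: alternative
-- what changed: A builds a full Counter first and then pairs up frequency buckets value-by-value; B makes a single streaming pass that greedily matches each incoming element against a dict of still-unmatched earlier elements, so no frequency table is ever precomputed.
import Mathlib
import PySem

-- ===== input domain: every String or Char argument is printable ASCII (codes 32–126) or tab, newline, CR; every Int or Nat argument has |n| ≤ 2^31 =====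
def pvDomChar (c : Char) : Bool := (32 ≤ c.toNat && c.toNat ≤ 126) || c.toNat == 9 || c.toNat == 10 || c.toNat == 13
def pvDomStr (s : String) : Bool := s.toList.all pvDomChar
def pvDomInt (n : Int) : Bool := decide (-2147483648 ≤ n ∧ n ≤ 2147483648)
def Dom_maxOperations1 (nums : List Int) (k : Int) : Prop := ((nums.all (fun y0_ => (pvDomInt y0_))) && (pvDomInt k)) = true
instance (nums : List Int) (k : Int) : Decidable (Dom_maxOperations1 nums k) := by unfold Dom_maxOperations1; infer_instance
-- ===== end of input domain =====

-- B replaces A's Counter-then-pair-up-values strategy by a single streaming pass that greedily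
-- matches each element against a dict of still-unmatched elements (objective: alternative).


-- ===== PORT A =====
-- loop body of A's 'for num in freq' (reads/writes of freq follow the Python line by line)
def pvStepA (k : Int) (st : Int × PySem.Dict Int Int) (num : Int) : Int × PySem.Dict Int Int :=
  let pairs := st.1
  let freq := st.2
  let target := k - num
  if target = num then
    let ops := PySem.Int.floordiv (freq.getD num 0) 2
    (pairs + ops, freq.insert num (freq.getD num 0 - ops * 2))
  else if target > num ∧ freq.contains target = true then
    let ops := min (freq.getD num 0) (freq.getD target 0)
    (pairs + ops, (freq.insert num (freq.getD num 0 - ops)).insert target (freq.getD target 0 - ops))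
  else
    (pairs, freq)

def maxOperations1 (nums : List Int) (k : Int) : Int :=
  let freq := PySem.Dict.counter nums        -- freq = dict(Counter(nums))
  (freq.keys.foldl (pvStepA k) (0, freq)).1  -- keys are fixed while the loop mutates values

-- ===== PORT B =====
-- loop body of B's single pass
def pvStepB (k : Int) (st : Int × PySem.Dict Int Int) (num : Int) : Int × PySem.Dict Int Int :=
  let pairs := st.1
  let waiting := st.2
  let need := k - num
  if waiting.getD need 0 > 0 then
    (pairs + 1, waiting.insert need (waiting.getD need 0 - 1))
  else
    (pairs, waiting.insert num (waiting.getD num 0 + 1))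

def maxOperations1_alt (nums : List Int) (k : Int) : Int :=
  (nums.foldl (pvStepB k) (0, PySem.Dict.empty)).1

-- ===== PRECONDITION & SPEC =====
def Spec_maxOperations1 (nums : List Int) (k : Int) (out : Int) : Prop := out = maxOperations1_alt nums k
instance (nums : List Int) (k : Int) (out : Int) : Decidable (Spec_maxOperations1 nums k out) := by unfold Spec_maxOperations1; infer_instance

-- ===== CLAIM (what is proved, stated in full; the proofs are below) =====
def Claim_equal_maxOperations1 : Prop := ∀ (nums : List Int) (k : Int), Dom_maxOperations1 nums k → Spec_maxOperations1 nums k (maxOperations1 nums k)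

-- ===== LEMMAS AND PROOFS =====

-- count of v in l, as an Int
def pvC (l : List Int) (v : Int) : Int := (l.count v : Int)

-- contribution of the distinct value v to the answer on list l
def pvH (l : List Int) (k v : Int) : Int :=
  if 2 * v = k then ((l.count v / 2 : Nat) : Int)
  else if 2 * v < k then min (pvC l v) (pvC l (k - v)) else 0

-- the common reference value: total number of removable k-sum pairs of l
def pvF (l : List Int) (k : Int) : Int := ∑ v ∈ l.toFinset, pvH l k v

-- residual unmatched copies of v after B's greedy pass over l
def pvR (l : List Int) (k v : Int) : Int :=
  if 2 * v = k then ((l.count v % 2 : Nat) : Int) else max (pvC l v - pvC l (k - v)) 0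

lemma pvC_nonneg (l : List Int) (v : Int) : 0 ≤ pvC l v := by
  simp [pvC]

lemma pvC_append (l : List Int) (x v : Int) :
    pvC (l ++ [x]) v = pvC l v + (if v = x then 1 else 0) := by
  have hx : List.count v [x] = if v = x then 1 else 0 := by
    by_cases h : v = x
    · subst h; simp
    · have h2 : ¬ (x = v) := fun hh => h hh.symm
      simp [h, h2]
  simp [pvC, List.count_append, hx]

lemma pvH_zero_of_not_mem (l : List Int) (k v : Int) (hv : v ∉ l) : pvH l k v = 0 := by
  have hc : l.count v = 0 := List.count_eq_zero_of_not_mem hv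
  have hn := pvC_nonneg l (k - v)
  unfold pvH pvC
  rw [hc]
  split_ifs <;> simp_all

lemma pvH_append_other (l : List Int) (k x v : Int) (hvx : v ≠ x) (hvt : v ≠ k - x) :
    pvH (l ++ [x]) k v = pvH l k v := by
  have h1 : pvC (l ++ [x]) v = pvC l v := by rw [pvC_append]; simp [hvx]
  have h2 : pvC (l ++ [x]) (k - v) = pvC l (k - v) := by
    rw [pvC_append]
    have : ¬ (k - v = x) := by intro h; exact hvt (by omega)
    simp [this]
  have h3 : (l ++ [x]).count v = l.count v := by
    have := h1; simpa [pvC] using this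
  unfold pvH
  rw [h1, h2, h3]

lemma pvF_eq_sum (l : List Int) (k : Int) (s : Finset Int) (h : l.toFinset ⊆ s) :
    pvF l k = ∑ v ∈ s, pvH l k v := by
  unfold pvF
  refine Finset.sum_subset h ?_
  intro x _ hx
  exact pvH_zero_of_not_mem l k x (by simpa using hx)

lemma toFinset_append_singleton (l : List Int) (x : Int) :
    (l ++ [x]).toFinset = insert x l.toFinset := by
  ext v; simp

-- F after appending the midpoint value k/2
lemma pvF_append_self (l : List Int) (k x : Int) (h2 : 2 * x = k) :
    pvF (l ++ [x]) k = pvF l k + ((l.count x % 2 : Nat) : Int) := by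
  have hx : x = k - x := by omega
  set s : Finset Int := insert x l.toFinset with hs
  have hsub : l.toFinset ⊆ s := Finset.subset_insert _ _
  have hsub' : (l ++ [x]).toFinset ⊆ s := by rw [toFinset_append_singleton]
  have hmem : x ∈ s := Finset.mem_insert_self _ _
  rw [pvF_eq_sum l k s hsub, pvF_eq_sum (l ++ [x]) k s hsub']
  rw [← Finset.add_sum_erase s _ hmem, ← Finset.add_sum_erase s (pvH l k) hmem]
  have hrest : ∑ v ∈ s.erase x, pvH (l ++ [x]) k v = ∑ v ∈ s.erase x, pvH l k v := by
    refine Finset.sum_congr rfl ?_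
    intro v hv
    have hne : v ≠ x := Finset.ne_of_mem_erase hv
    exact pvH_append_other l k x v hne (by omega)
  rw [hrest]
  have hcnt : (l ++ [x]).count x = l.count x + 1 := by
    simp [List.count_append]
  unfold pvH
  rw [if_pos h2, if_pos h2, hcnt]
  have : (l.count x + 1) / 2 = l.count x / 2 + l.count x % 2 := by omega
  rw [this]
  push_cast
  ring

-- F after appending x with 2x ≠ k
lemma pvF_append_pair (l : List Int) (k x : Int) (h2 : 2 * x ≠ k) :
    pvF (l ++ [x]) k = pvF l k + (if pvC l x < pvC l (k - x) then 1 else 0) := by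
  set t : Int := k - x with ht
  have htx : t ≠ x := by omega
  set s : Finset Int := insert x (insert t l.toFinset) with hs
  have hsub : l.toFinset ⊆ s := by
    intro v hv; exact Finset.mem_insert_of_mem (Finset.mem_insert_of_mem hv)
  have hsub' : (l ++ [x]).toFinset ⊆ s := by
    rw [toFinset_append_singleton]
    exact Finset.insert_subset_insert _ (Finset.subset_insert _ _)
  have hxs : x ∈ s := Finset.mem_insert_self _ _
  have hts : t ∈ s.erase x :=
    Finset.mem_erase.mpr ⟨htx, Finset.mem_insert_of_mem (Finset.mem_insert_self _ _)⟩
  rw [pvF_eq_sum l k s hsub, pvF_eq_sum (l ++ [x]) k s hsub']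
  rw [← Finset.add_sum_erase s _ hxs, ← Finset.add_sum_erase s (pvH l k) hxs]
  rw [← Finset.add_sum_erase _ _ hts, ← Finset.add_sum_erase _ (pvH l k) hts]
  have hrest : ∑ v ∈ (s.erase x).erase t, pvH (l ++ [x]) k v
      = ∑ v ∈ (s.erase x).erase t, pvH l k v := by
    refine Finset.sum_congr rfl ?_
    intro v hv
    have hvt : v ≠ t := Finset.ne_of_mem_erase hv
    have hvx : v ≠ x := Finset.ne_of_mem_erase (Finset.mem_of_mem_erase hv)
    exact pvH_append_other l k x v hvx (by omega)
  rw [hrest]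
  have hcx : pvC (l ++ [x]) x = pvC l x + 1 := by rw [pvC_append]; simp
  have hct : pvC (l ++ [x]) t = pvC l t := by rw [pvC_append]; simp [htx]
  have hcxn : (l ++ [x]).count x = l.count x + 1 := by simp [List.count_append]
  have hkt : k - t = x := by omega
  have h2t : 2 * t ≠ k := by omega
  have hHx : pvH (l ++ [x]) k x - pvH l k x
      = if 2 * x < k then (min (pvC l x + 1) (pvC l t) - min (pvC l x) (pvC l t)) else 0 := by
    unfold pvH
    rw [if_neg h2, if_neg h2, hcx, hct]
    split_ifs <;> ring
  have hHt : pvH (l ++ [x]) k t - pvH l k t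
      = if 2 * t < k then (min (pvC l t) (pvC l x + 1) - min (pvC l t) (pvC l x)) else 0 := by
    unfold pvH
    rw [if_neg h2t, if_neg h2t, hct, hkt, hcx]
    split_ifs <;> ring
  have honeside : (2 * x < k ∧ ¬ 2 * t < k) ∨ (¬ 2 * x < k ∧ 2 * t < k) := by omega
  rcases honeside with ⟨hxlt, htlt⟩ | ⟨hxlt, htlt⟩ <;>
    [rw [if_pos hxlt] at hHx; rw [if_neg hxlt] at hHx] <;>
    [rw [if_neg htlt] at hHt; rw [if_pos htlt] at hHt] <;>
    split_ifs <;> omega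

lemma pvR_append_other (l : List Int) (k x v : Int) (hvx : v ≠ x) (hvt : v ≠ k - x) :
    pvR (l ++ [x]) k v = pvR l k v := by
  have h1 : pvC (l ++ [x]) v = pvC l v := by rw [pvC_append]; simp [hvx]
  have h2 : pvC (l ++ [x]) (k - v) = pvC l (k - v) := by
    rw [pvC_append]
    have : ¬ (k - v = x) := by intro h; exact hvt (by omega)
    simp [this]
  have h3 : (l ++ [x]).count v = l.count v := by simpa [pvC] using h1
  unfold pvR
  rw [h1, h2, h3]

lemma append_cons_eq (pre : List Int) (x : Int) (rest : List Int) :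
    pre ++ x :: rest = (pre ++ [x]) ++ rest := by simp

-- B's loop invariant: pairs so far = pvF of the processed prefix, and the waiting dict
-- holds exactly the residual counts pvR of that prefix.
lemma B_loop (k : Int) :
    ∀ (rest pre : List Int) (pairs : Int) (w : PySem.Dict Int Int),
      pairs = pvF pre k →
      (∀ v, w.getD v 0 = pvR pre k v) →
      (rest.foldl (pvStepB k) (pairs, w)).1 = pvF (pre ++ rest) k := by
  intro rest
  induction rest with
  | nil => intro pre pairs w hp _; simpa using hp
  | cons x rest ih =>
    intro pre pairs w hp hw
    rw [List.foldl_cons, append_cons_eq]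
    by_cases hsame : 2 * x = k
    · -- x is its own partner
      have hxt : k - x = x := by omega
      have hgt : w.getD (k - x) 0 = ((pre.count x % 2 : Nat) : Int) := by
        rw [hxt, hw x]; unfold pvR; rw [if_pos hsame]
      have hcnt : (pre ++ [x]).count x = pre.count x + 1 := by simp [List.count_append]
      by_cases hodd : pre.count x % 2 = 1
      · have hpos : w.getD (k - x) 0 > 0 := by rw [hgt, hodd]; norm_num
        have hstep : pvStepB k (pairs, w) x
            = (pairs + 1, w.insert (k - x) (w.getD (k - x) 0 - 1)) := by
          unfold pvStepB; simp [hpos]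
        rw [hstep]
        refine ih (pre ++ [x]) _ _ ?_ ?_
        · rw [hp, pvF_append_self pre k x hsame, hodd]; norm_num
        · intro v
          by_cases hvx : v = x
          · have hgtx := hgt
            rw [hxt] at hgtx
            rw [hvx, hxt, PySem.Dict.getD_insert, if_pos rfl, hgtx, hodd]
            unfold pvR
            rw [if_pos hsame, hcnt]
            omega
          · rw [hxt, PySem.Dict.getD_insert, if_neg hvx, hw v,
              pvR_append_other pre k x v hvx (by omega)]
      · have heven : pre.count x % 2 = 0 := by omega
        have hnpos : ¬ w.getD (k - x) 0 > 0 := by rw [hgt, heven]; norm_num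
        have hstep : pvStepB k (pairs, w) x
            = (pairs, w.insert x (w.getD x 0 + 1)) := by
          unfold pvStepB; simp [hnpos]
        rw [hstep]
        refine ih (pre ++ [x]) _ _ ?_ ?_
        · rw [hp, pvF_append_self pre k x hsame, heven]; norm_num
        · intro v
          by_cases hvx : v = x
          · rw [hvx, PySem.Dict.getD_insert, if_pos rfl, hw x]
            unfold pvR
            rw [if_pos hsame, if_pos hsame, hcnt, heven]
            omega
          · rw [PySem.Dict.getD_insert, if_neg hvx, hw v,
              pvR_append_other pre k x v hvx (by omega)]
    · -- x ≠ k - x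
      have htx : k - x ≠ x := by omega
      have h2t : 2 * (k - x) ≠ k := by omega
      have hktx : k - (k - x) = x := by omega
      have hgt : w.getD (k - x) 0 = max (pvC pre (k - x) - pvC pre x) 0 := by
        rw [hw (k - x)]; unfold pvR; rw [if_neg h2t, hktx]
      have hcx : pvC (pre ++ [x]) x = pvC pre x + 1 := by rw [pvC_append]; simp
      have hct : pvC (pre ++ [x]) (k - x) = pvC pre (k - x) := by
        rw [pvC_append]; simp [htx]
      by_cases hlt : pvC pre x < pvC pre (k - x)
      · have hpos : w.getD (k - x) 0 > 0 := by rw [hgt]; omega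
        have hstep : pvStepB k (pairs, w) x
            = (pairs + 1, w.insert (k - x) (w.getD (k - x) 0 - 1)) := by
          unfold pvStepB; simp [hpos]
        rw [hstep]
        refine ih (pre ++ [x]) _ _ ?_ ?_
        · rw [hp, pvF_append_pair pre k x hsame, if_pos hlt]
        · intro v
          by_cases hvt : v = k - x
          · rw [hvt, PySem.Dict.getD_insert, if_pos rfl, hgt]
            unfold pvR
            rw [if_neg h2t, hktx, hct, hcx]
            omega
          · rw [PySem.Dict.getD_insert, if_neg hvt]
            by_cases hvx : v = x
            · rw [hvx, hw x]
              unfold pvR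
              rw [if_neg hsame, if_neg hsame, hcx, hct]
              omega
            · rw [hw v, pvR_append_other pre k x v hvx (fun h => hvt h)]
      · have hnpos : ¬ w.getD (k - x) 0 > 0 := by rw [hgt]; omega
        have hstep : pvStepB k (pairs, w) x
            = (pairs, w.insert x (w.getD x 0 + 1)) := by
          unfold pvStepB; simp [hnpos]
        rw [hstep]
        refine ih (pre ++ [x]) _ _ ?_ ?_
        · rw [hp, pvF_append_pair pre k x hsame, if_neg hlt]; ring
        · intro v
          by_cases hvx : v = x
          · rw [hvx, PySem.Dict.getD_insert, if_pos rfl, hw x]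
            unfold pvR
            rw [if_neg hsame, if_neg hsame, hcx, hct]
            omega
          · rw [PySem.Dict.getD_insert, if_neg hvx]
            by_cases hvt : v = k - x
            · rw [hvt, hw (k - x)]
              unfold pvR
              rw [if_neg h2t, if_neg h2t, hktx, hct, hcx]
              omega
            · rw [hw v, pvR_append_other pre k x v hvx hvt]

lemma B_eq_F (nums : List Int) (k : Int) : maxOperations1_alt nums k = pvF nums k := by
  simp only [maxOperations1_alt]
  have hinit : ∀ v : Int, (PySem.Dict.empty : PySem.Dict Int Int).getD v 0 = pvR [] k v := by
    intro v
    unfold pvR pvC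
    simp [PySem.Dict.getD_empty]
  have h := B_loop k nums [] 0 PySem.Dict.empty (by simp [pvF]) hinit
  simpa using h

-- A's loop invariant: entries of freq read in later iterations still hold the original
-- counts, and pairs accumulates pvH of each processed key.
lemma A_loop (nums : List Int) (k : Int) :
    ∀ (rest : List Int) (pairs : Int) (freq : PySem.Dict Int Int),
      rest.Nodup →
      (∀ v ∈ rest, v ∈ nums) →
      (∀ v ∈ rest, 2 * v ≤ k → freq.getD v 0 = pvC nums v) →
      (∀ v : Int, k < 2 * v → (k - v) ∈ rest → freq.getD v 0 = pvC nums v) →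
      (∀ v : Int, freq.contains v = nums.contains v) →
      (rest.foldl (pvStepA k) (pairs, freq)).1 = pairs + (rest.map (pvH nums k)).sum := by
  intro rest
  induction rest with
  | nil => intro pairs freq _ _ _ _ _; simp
  | cons num rest ih =>
    intro pairs freq hnd hmem hinv1 hinv2 hcont
    have hnum_mem : num ∈ nums := hmem num (by simp)
    have hnd' : rest.Nodup := (List.nodup_cons.mp hnd).2
    have hnum_nin : num ∉ rest := (List.nodup_cons.mp hnd).1
    have hmem' : ∀ v ∈ rest, v ∈ nums := fun v hv => hmem v (by simp [hv])
    rw [List.foldl_cons]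
    by_cases hsame : k - num = num
    · -- target == num
      have h2 : 2 * num = k := by omega
      have hget : freq.getD num 0 = pvC nums num :=
        hinv1 num (by simp) (by omega)
      have hops : PySem.Int.floordiv (freq.getD num 0) 2
          = ((nums.count num / 2 : Nat) : Int) := by
        rw [hget]
        unfold pvC
        exact_mod_cast PySem.Int.floordiv_natCast (nums.count num) 2
      have hstep : pvStepA k (pairs, freq) num
          = (pairs + ((nums.count num / 2 : Nat) : Int),
             freq.insert num (freq.getD num 0 - ((nums.count num / 2 : Nat) : Int) * 2)) := by
        simp only [pvStepA]
        rw [if_pos hsame, hops]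
      have hinv1' : ∀ v ∈ rest, 2 * v ≤ k →
          (freq.insert num (freq.getD num 0 - ((nums.count num / 2 : Nat) : Int) * 2)).getD v 0
            = pvC nums v := by
        intro v hv h2v
        have hvn : v ≠ num := fun h => hnum_nin (h ▸ hv)
        rw [PySem.Dict.getD_insert, if_neg hvn]
        exact hinv1 v (by simp [hv]) h2v
      have hinv2' : ∀ v : Int, k < 2 * v → (k - v) ∈ rest →
          (freq.insert num (freq.getD num 0 - ((nums.count num / 2 : Nat) : Int) * 2)).getD v 0
            = pvC nums v := by
        intro v h2v hkv
        have hvn : v ≠ num := by omega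
        rw [PySem.Dict.getD_insert, if_neg hvn]
        exact hinv2 v h2v (by simp [hkv])
      have hcont' : ∀ v : Int,
          (freq.insert num (freq.getD num 0 - ((nums.count num / 2 : Nat) : Int) * 2)).contains v
            = nums.contains v := by
        intro v
        rw [PySem.Dict.contains_insert, hcont]
        by_cases hv : v = num
        · rw [hv]
          simp [hnum_mem]
        · have b2 : (v == num) = false := beq_eq_false_iff_ne.mpr hv
          simp [b2]
      rw [hstep, ih _ _ hnd' hmem' hinv1' hinv2' hcont']
      have hH : pvH nums k num = ((nums.count num / 2 : Nat) : Int) := by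
        unfold pvH; rw [if_pos h2]
      rw [List.map_cons, List.sum_cons, hH]
      ring
    · by_cases hbig : k - num > num ∧ freq.contains (k - num) = true
      · -- target > num and target in freq
        obtain ⟨hgt, hin⟩ := hbig
        have h2lt : 2 * num < k := by omega
        have h2tgt : k < 2 * (k - num) := by omega
        have htmem : (k - num) ∈ nums := by
          have hc := hcont (k - num)
          rw [hc] at hin
          exact List.contains_iff_mem.mp hin
        have hgn : freq.getD num 0 = pvC nums num := hinv1 num (by simp) (by omega)
        have hgtv : freq.getD (k - num) 0 = pvC nums (k - num) :=
          hinv2 (k - num) h2tgt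
            (by
              have hkk : k - (k - num) = num := by omega
              simp [hkk])
        have hstep : pvStepA k (pairs, freq) num
            = (pairs + min (pvC nums num) (pvC nums (k - num)),
               (freq.insert num (pvC nums num - min (pvC nums num) (pvC nums (k - num)))).insert
                 (k - num) (pvC nums (k - num) - min (pvC nums num) (pvC nums (k - num)))) := by
          simp only [pvStepA]
          rw [if_neg hsame, if_pos (And.intro hgt hin), hgn, hgtv]
        have hinv1' : ∀ v ∈ rest, 2 * v ≤ k →
            ((freq.insert num (pvC nums num - min (pvC nums num) (pvC nums (k - num)))).insert
              (k - num) (pvC nums (k - num) - min (pvC nums num) (pvC nums (k - num)))).getD v 0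
              = pvC nums v := by
          intro v hv h2v
          have hvn : v ≠ num := fun h => hnum_nin (h ▸ hv)
          have hvt : v ≠ k - num := by omega
          rw [PySem.Dict.getD_insert, if_neg hvt, PySem.Dict.getD_insert, if_neg hvn]
          exact hinv1 v (by simp [hv]) h2v
        have hinv2' : ∀ v : Int, k < 2 * v → (k - v) ∈ rest →
            ((freq.insert num (pvC nums num - min (pvC nums num) (pvC nums (k - num)))).insert
              (k - num) (pvC nums (k - num) - min (pvC nums num) (pvC nums (k - num)))).getD v 0
              = pvC nums v := by
          intro v h2v hkv
          have hvn : v ≠ num := by omega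
          have hvt : v ≠ k - num := by
            intro h
            apply hnum_nin
            have hh : k - v = num := by omega
            rwa [hh] at hkv
          rw [PySem.Dict.getD_insert, if_neg hvt, PySem.Dict.getD_insert, if_neg hvn]
          exact hinv2 v h2v (by simp [hkv])
        have hcont' : ∀ v : Int,
            ((freq.insert num (pvC nums num - min (pvC nums num) (pvC nums (k - num)))).insert
              (k - num) (pvC nums (k - num) - min (pvC nums num) (pvC nums (k - num)))).contains v
              = nums.contains v := by
          intro v
          rw [PySem.Dict.contains_insert, PySem.Dict.contains_insert, hcont]
          by_cases hv1 : v = k - num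
          · rw [hv1]
            simp [htmem]
          · by_cases hv2 : v = num
            · rw [hv2]
              simp [hnum_mem]
            · have b1 : (v == k - num) = false := beq_eq_false_iff_ne.mpr hv1
              have b2 : (v == num) = false := beq_eq_false_iff_ne.mpr hv2
              simp [b1, b2]
        rw [hstep, ih _ _ hnd' hmem' hinv1' hinv2' hcont']
        have hH : pvH nums k num = min (pvC nums num) (pvC nums (k - num)) := by
          unfold pvH
          rw [if_neg (by omega), if_pos h2lt]
        rw [List.map_cons, List.sum_cons, hH]
        ring
      · -- neither branch fires
        have hstep : pvStepA k (pairs, freq) num = (pairs, freq) := by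
          simp only [pvStepA]
          rw [if_neg hsame, if_neg hbig]
        have hinv1' : ∀ v ∈ rest, 2 * v ≤ k → freq.getD v 0 = pvC nums v :=
          fun v hv h2v => hinv1 v (by simp [hv]) h2v
        have hinv2' : ∀ v : Int, k < 2 * v → (k - v) ∈ rest → freq.getD v 0 = pvC nums v :=
          fun v h2v hkv => hinv2 v h2v (by simp [hkv])
        rw [hstep, ih _ _ hnd' hmem' hinv1' hinv2' hcont]
        have hzero : pvH nums k num = 0 := by
          unfold pvH
          rw [if_neg (by omega)]
          by_cases hlt : 2 * num < k
          · rw [if_pos hlt]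
            have hgtv : k - num > num := by omega
            have hnin : freq.contains (k - num) ≠ true := fun h => hbig ⟨hgtv, h⟩
            have hnmem : (k - num) ∉ nums := by
              intro h
              apply hnin
              rw [hcont]
              exact List.contains_iff_mem.mpr h
            have hc0 : pvC nums (k - num) = 0 := by
              unfold pvC
              simp [List.count_eq_zero_of_not_mem hnmem]
            have := pvC_nonneg nums num
            omega
          · rw [if_neg hlt]
        rw [List.map_cons, List.sum_cons, hzero]
        ring

lemma A_eq_F (nums : List Int) (k : Int) : maxOperations1 nums k = pvF nums k := by
  simp only [maxOperations1]
  rw [PySem.Dict.keys_counter]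
  rw [A_loop nums k (PySem.Set.ofList nums) 0 (PySem.Dict.counter nums)
      (PySem.Set.nodup_ofList nums)
      (fun v hv => (PySem.Set.mem_ofList nums v).mp hv)
      (fun v _ _ => by rw [PySem.Dict.getD_counter]; rfl)
      (fun v _ _ => by rw [PySem.Dict.getD_counter]; rfl)
      (fun v => PySem.Dict.contains_counter nums v)]
  have hfin : (PySem.Set.ofList nums).toFinset = nums.toFinset := by
    ext v
    simp [PySem.Set.mem_ofList]
  rw [zero_add, ← List.sum_toFinset (pvH nums k) (PySem.Set.nodup_ofList nums), hfin]
  rfl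

-- ===== VERDICT (by name: the statement is the Claim_ definition above) =====
theorem maxOperations1_spec : Claim_equal_maxOperations1 := by
  intro nums k _
  unfold Spec_maxOperations1
  rw [A_eq_F, B_eq_F]
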